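-- pv_equiv track=rewrite | github.com/malabz/Jtmsa | MSA_Star_Multi_core.py | getGapsLoc
-- ===== SOURCE A (Python) =====
-- def getGapsLoc(strsAligned:list, markInsertion:list, idxC:int):
--     """
--     compute the gaps location
--     """
--     for str in strsAligned:
--         i = 0
--         counter = 0
--         for c in str[0]:
--             if c == '-':
--                 counter += 1
--             else:
--                 markInsertion[i] = max(markInsertion[i], counter)
--                 counter = 0
--                 i += 1
--             markInsertion[i] = max(markInsertion[i], counter)
--     return markInsertion
-- ===== SOURCE B (Python) =====
-- def getGapsLoc(strsAligned: list, markInsertion: list, idxC: int):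
--     """
--     compute the gaps location
--     (mutates markInsertion in place, like the original)
--     """
--     for elem in strsAligned:
--         s = elem[0]
--         if not s:
--             continue
--         # indices of the non-gap characters
--         pos = [j for j, c in enumerate(s) if c != '-']
--         if pos:
--             gaps = [pos[0]] \
--                 + [b - a - 1 for a, b in zip(pos, pos[1:])] \
--                 + [len(s) - 1 - pos[-1]]
--         else:
--             gaps = [len(s)]
--         for i, g in enumerate(gaps):
--             markInsertion[i] = max(markInsertion[i], g)
--     return markInsertion
-- ===== Notes on version B (the rewrite author's own statement) =====
-- stated objective: alternative
-- what changed: B replaces A's per-character counter state machine by computing, per row, the non-gap character positions and deriving the gap-run vector from successive position differences, then merging it into markInsertion with one max per slot.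
-- outside the precondition, e.g. on getGapsLoc([['ab']], [0], 0): A raises IndexError, B raises IndexError; on getGapsLoc([[]], [0], 0): A raises IndexError, B raises IndexError
import Mathlib
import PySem

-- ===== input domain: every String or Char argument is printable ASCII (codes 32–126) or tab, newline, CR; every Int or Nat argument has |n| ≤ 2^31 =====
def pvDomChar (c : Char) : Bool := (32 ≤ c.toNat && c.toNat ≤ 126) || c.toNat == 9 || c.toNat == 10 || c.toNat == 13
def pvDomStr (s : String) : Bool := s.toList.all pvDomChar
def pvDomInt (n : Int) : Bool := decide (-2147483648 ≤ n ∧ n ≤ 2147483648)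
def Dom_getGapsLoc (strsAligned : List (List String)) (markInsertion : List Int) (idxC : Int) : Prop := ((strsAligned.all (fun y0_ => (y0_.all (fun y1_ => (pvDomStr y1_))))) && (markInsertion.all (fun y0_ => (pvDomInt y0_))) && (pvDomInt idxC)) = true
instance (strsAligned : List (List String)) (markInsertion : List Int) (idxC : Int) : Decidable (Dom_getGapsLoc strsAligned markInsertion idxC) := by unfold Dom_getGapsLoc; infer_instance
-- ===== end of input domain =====

-- B recomputes each row's gap-run vector from the positions of its non-gap characters
-- (successive index differences) and merges it into markInsertion with one max per slot,
-- instead of A's per-character counter loop; equal return value on Pre_ (both mutate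
-- markInsertion in place in Python; the equivalence proved here is about the return value).

-- ===== PORT A =====
-- markInsertion[i] = max(markInsertion[i], v); none = IndexError (i out of range)
def pvUpdMax (m : List Int) (i : Nat) (v : Int) : Option (List Int) :=
  match m[i]? with
  | none => none
  | some old => some (m.set i (max old v))

-- A's inner per-character loop, state (i, counter, markInsertion)
def pvLoopA : List Char → Nat → Int → List Int → Option (List Int)
  | [], _, _, m => some m
  | c :: cs, i, cnt, m =>
    if c = '-' then
      match pvUpdMax m i (cnt + 1) with
      | none => none
      | some m' => pvLoopA cs i (cnt + 1) m'
    else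
      match pvUpdMax m i cnt with
      | none => none
      | some m1 =>
        match pvUpdMax m1 (i + 1) 0 with
        | none => none
        | some m2 => pvLoopA cs (i + 1) 0 m2

-- A's outer loop over strsAligned; str[0] on an empty list = IndexError = none
def pvOuterA : List (List String) → List Int → Option (List Int)
  | [], m => some m
  | elem :: rest, m =>
    match elem with
    | [] => none
    | s :: _ =>
      match pvLoopA s.toList 0 0 m with
      | none => none
      | some m' => pvOuterA rest m'

def getGapsLoc (strsAligned : List (List String)) (markInsertion : List Int) (idxC : Int) : List Int :=
  (pvOuterA strsAligned markInsertion).getD markInsertion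

-- ===== PORT B =====
-- gap-run vector of one row: pos = indices of non-gap chars, gaps = leading gap count,
-- successive differences minus one, trailing gap count (pos[-1] on a nonempty pos = getLastD)
def pvGapsB (cs : List Char) : List Int :=
  let pos : List Int := ((PySem.List.enumerate cs).filter (fun p => p.2 != '-')).map (fun p => p.1)
  match pos with
  | [] => [(cs.length : Int)]
  | p0 :: _ =>
    p0 :: (List.zipWith (fun a b => b - a - 1) pos (pos.drop 1) ++ [(cs.length : Int) - 1 - pos.getLastD 0])

-- for i, g in enumerate(gaps): markInsertion[i] = max(markInsertion[i], g)
def pvMergeB : Nat → List Int → List Int → Option (List Int)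
  | _, [], m => some m
  | i, g :: gs, m =>
    match pvUpdMax m i g with
    | none => none
    | some m' => pvMergeB (i + 1) gs m'

def pvOuterB : List (List String) → List Int → Option (List Int)
  | [], m => some m
  | elem :: rest, m =>
    match elem with
    | [] => none
    | s :: _ =>
      if s.toList = [] then pvOuterB rest m
      else
        match pvMergeB 0 (pvGapsB s.toList) m with
        | none => none
        | some m' => pvOuterB rest m'

def getGapsLoc_alt (strsAligned : List (List String)) (markInsertion : List Int) (idxC : Int) : List Int :=
  (pvOuterB strsAligned markInsertion).getD markInsertion

-- ===== PRECONDITION & SPEC =====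
-- Pre_ excludes exactly the inputs where A raises IndexError: an empty inner list (str[0]),
-- or a row whose non-gap character count reaches the end of markInsertion (A touches the
-- slot AFTER the last non-gap run, even with zero trailing gaps).
def Pre_getGapsLoc (strsAligned : List (List String)) (markInsertion : List Int) (idxC : Int) : Prop :=
  ∀ elem ∈ strsAligned, elem ≠ [] ∧
    ((elem.headD "").toList ≠ [] →
      (elem.headD "").toList.countP (fun c => c != '-') < markInsertion.length)
instance (strsAligned : List (List String)) (markInsertion : List Int) (idxC : Int) : Decidable (Pre_getGapsLoc strsAligned markInsertion idxC) := by unfold Pre_getGapsLoc; infer_instance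

def pvWitness_getGapsLoc : List (List String) × List Int × Int := ([["a-b"], ["--"]], [0, -3, 1], 0)

def Spec_getGapsLoc (strsAligned : List (List String)) (markInsertion : List Int) (idxC : Int) (out : List Int) : Prop := out = getGapsLoc_alt strsAligned markInsertion idxC
instance (strsAligned : List (List String)) (markInsertion : List Int) (idxC : Int) (out : List Int) : Decidable (Spec_getGapsLoc strsAligned markInsertion idxC out) := by unfold Spec_getGapsLoc; infer_instance

-- ===== CLAIM (what is proved, stated in full; the proofs are below) =====
def Claim_equal_getGapsLoc : Prop := ∀ (strsAligned : List (List String)) (markInsertion : List Int) (idxC : Int), Dom_getGapsLoc strsAligned markInsertion idxC → Pre_getGapsLoc strsAligned markInsertion idxC → Spec_getGapsLoc strsAligned markInsertion idxC (getGapsLoc strsAligned markInsertion idxC)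

-- ===== LEMMAS AND PROOFS =====

-- canonical gap-run vector of cs with a pending run of length c
def pvGapsFrom : Int → List Char → List Int
  | c, [] => [c]
  | c, d :: cs => if d = '-' then pvGapsFrom (c + 1) cs else c :: pvGapsFrom 0 cs

-- positions of non-gap chars when enumeration starts at s
def pvPosFrom (s : Int) (cs : List Char) : List Int :=
  ((PySem.List.enumerate cs s).filter (fun p => p.2 != '-')).map (fun p => p.1)

-- generalized form of B's gaps construction (start offset s, length L, pending run c)
def pvGapsW (c s L : Int) (ps : List Int) : List Int :=
  match ps with
  | [] => [c + L]
  | p0 :: _ =>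
    (c + (p0 - s)) :: (List.zipWith (fun a b => b - a - 1) ps (ps.drop 1) ++ [s + L - 1 - ps.getLastD 0])

theorem pvPosFrom_nil (s : Int) : pvPosFrom s [] = [] := rfl

theorem pvPosFrom_cons (s : Int) (d : Char) (cs : List Char) :
    pvPosFrom s (d :: cs) =
      (if d = '-' then pvPosFrom (s + 1) cs else s :: pvPosFrom (s + 1) cs) := by
  by_cases h : d = '-' <;>
    simp [pvPosFrom, PySem.List.enumerate_cons, h]

theorem pvUpdMax_absorb (m : List Int) (i : Nat) (a b : Int) (h : a ≤ b) :
    (pvUpdMax m i a).bind (fun m' => pvUpdMax m' i b) = pvUpdMax m i b := by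
  unfold pvUpdMax
  cases hg : m[i]? with
  | none => simp
  | some old =>
    have hi : i < m.length := (List.getElem?_eq_some_iff.mp hg).1
    simp [hi, List.set_set]
    congr 1
    omega

theorem pvLoopA_gap (cs : List Char) (i : Nat) (c : Int) (m : List Int) :
    pvLoopA ('-' :: cs) i c m = (pvUpdMax m i (c + 1)).bind (fun m' => pvLoopA cs i (c + 1) m') := by
  simp only [pvLoopA]
  cases h : pvUpdMax m i (c + 1) <;> simp

theorem pvLoopA_nongap (d : Char) (hd : ¬ d = '-') (cs : List Char) (i : Nat) (c : Int) (m : List Int) :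
    pvLoopA (d :: cs) i c m =
      (pvUpdMax m i c).bind (fun m1 => (pvUpdMax m1 (i + 1) 0).bind (fun m2 => pvLoopA cs (i + 1) 0 m2)) := by
  simp only [pvLoopA, if_neg hd]
  cases h1 : pvUpdMax m i c with
  | none => simp
  | some m1 =>
    cases h2 : pvUpdMax m1 (i + 1) 0 <;> simp [h2]

theorem pvMergeB_cons (i : Nat) (g : Int) (gs : List Int) (m : List Int) :
    pvMergeB i (g :: gs) m = (pvUpdMax m i g).bind (fun m' => pvMergeB (i + 1) gs m') := by
  simp only [pvMergeB]
  cases h : pvUpdMax m i g <;> simp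

-- key loop invariant: merging the pending counter then running A's loop equals
-- merging the whole gap-run vector
theorem pvL1 (cs : List Char) : ∀ (i : Nat) (c : Int) (m : List Int),
    (pvUpdMax m i c).bind (fun m' => pvLoopA cs i c m') = pvMergeB i (pvGapsFrom c cs) m := by
  induction cs with
  | nil =>
    intro i c m
    simp [pvGapsFrom, pvMergeB_cons, pvLoopA, pvMergeB]
  | cons d cs ih =>
    intro i c m
    by_cases hd : d = '-'
    · subst hd
      simp only [pvLoopA_gap]
      rw [show pvGapsFrom c ('-' :: cs) = pvGapsFrom (c + 1) cs from by simp [pvGapsFrom]]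
      rw [← ih i (c + 1) m, ← pvUpdMax_absorb m i c (c + 1) (by omega), Option.bind_assoc]
    · simp only [pvLoopA_nongap d hd]
      rw [show pvGapsFrom c (d :: cs) = c :: pvGapsFrom 0 cs from by simp [pvGapsFrom, hd]]
      rw [pvMergeB_cons,
        show ((pvUpdMax m i c).bind fun m' =>
            (pvUpdMax m' i c).bind fun m1 => (pvUpdMax m1 (i + 1) 0).bind fun m2 => pvLoopA cs (i + 1) 0 m2)
          = ((pvUpdMax m i c).bind fun m' => pvUpdMax m' i c).bind
              (fun m1 => (pvUpdMax m1 (i + 1) 0).bind fun m2 => pvLoopA cs (i + 1) 0 m2)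
          from (Option.bind_assoc _ _ _).symm,
        pvUpdMax_absorb m i c c le_rfl]
      cases pvUpdMax m i c with
      | none => simp
      | some m1 => simpa using ih (i + 1) 0 m1

theorem pvLoopA_eq_mergeB (cs : List Char) (hne : cs ≠ []) (m : List Int) :
    pvLoopA cs 0 0 m = pvMergeB 0 (pvGapsFrom 0 cs) m := by
  cases cs with
  | nil => exact absurd rfl hne
  | cons d cs =>
    by_cases hd : d = '-'
    · subst hd
      rw [pvLoopA_gap, show pvGapsFrom 0 ('-' :: cs) = pvGapsFrom (0 + 1) cs from by simp [pvGapsFrom]]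
      exact pvL1 cs 0 (0 + 1) m
    · rw [pvLoopA_nongap d hd,
        show pvGapsFrom 0 (d :: cs) = (0 : Int) :: pvGapsFrom 0 cs from by simp [pvGapsFrom, hd],
        pvMergeB_cons]
      cases pvUpdMax m 0 0 with
      | none => rfl
      | some m1 => simpa using pvL1 cs (0 + 1) 0 m1

-- the canonical vector equals the generalized positions-based construction
theorem pvG (cs : List Char) : ∀ (c s : Int),
    pvGapsFrom c cs = pvGapsW c s (cs.length : Int) (pvPosFrom s cs) := by
  induction cs with
  | nil => intro c s; simp [pvGapsFrom, pvPosFrom_nil, pvGapsW]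
  | cons d cs ih =>
    intro c s
    by_cases hd : d = '-'
    · subst hd
      rw [show pvGapsFrom c ('-' :: cs) = pvGapsFrom (c + 1) cs from by simp [pvGapsFrom]]
      rw [ih (c + 1) (s + 1), pvPosFrom_cons, if_pos rfl]
      cases hps : pvPosFrom (s + 1) cs with
      | nil =>
        simp only [pvGapsW, List.length_cons, List.cons_eq_cons, and_true]
        push_cast
        omega
      | cons p0 ps =>
        simp only [pvGapsW, List.length_cons, List.cons_eq_cons,
          List.append_cancel_left_eq, and_true]
        push_cast
        refine ⟨by omega, by omega⟩
    · rw [show pvGapsFrom c (d :: cs) = c :: pvGapsFrom 0 cs from by simp [pvGapsFrom, hd]]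
      rw [ih 0 (s + 1), pvPosFrom_cons, if_neg hd]
      cases hps : pvPosFrom (s + 1) cs with
      | nil =>
        simp only [pvGapsW, List.length_cons, List.drop_one, List.tail_cons,
          List.zipWith_nil_right, List.nil_append, List.getLastD_cons, List.getLastD_nil,
          List.cons_eq_cons, and_true]
        push_cast
        refine ⟨by omega, by omega⟩
      | cons p0 ps =>
        simp only [pvGapsW, List.length_cons, List.drop_one, List.tail_cons,
          List.zipWith_cons_cons, List.getLastD_cons, List.cons_eq_cons]
        push_cast
        refine ⟨by ring, ?_⟩
        rw [show (0 + (p0 - (s + 1))) = p0 - s - 1 from by ring,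
          show s + 1 + (cs.length : Int) - 1 - ps.getLastD p0
              = s + ((cs.length : Int) + 1) - 1 - ps.getLastD p0 from by ring,
          List.cons_append]

-- B's literal gaps builder is the s = 0 instance
theorem pvGapsB_eq_gapsFrom (cs : List Char) : pvGapsB cs = pvGapsFrom 0 cs := by
  rw [pvG cs 0 0]
  show pvGapsB cs = pvGapsW 0 0 _ (pvPosFrom 0 cs)
  unfold pvGapsB pvGapsW pvPosFrom
  cases hps : ((PySem.List.enumerate cs (0 : Int)).filter (fun p => p.2 != '-')).map (fun p => p.1) with
  | nil => simp
  | cons p0 ps =>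
    simp only [List.cons_eq_cons, List.append_cancel_left_eq, and_true]
    refine ⟨by omega, by omega⟩

theorem pvOuter_eq (sa : List (List String)) : ∀ (m : List Int), pvOuterA sa m = pvOuterB sa m := by
  induction sa with
  | nil => intro m; rfl
  | cons elem rest ih =>
    intro m
    cases elem with
    | nil => rfl
    | cons s _ =>
      show (match pvLoopA s.toList 0 0 m with
            | none => none
            | some m' => pvOuterA rest m') = pvOuterB (_ :: rest) m
      by_cases hs : s.toList = []
      · simp [pvOuterB, hs, pvLoopA, ih]
      · rw [pvLoopA_eq_mergeB s.toList hs m, ← pvGapsB_eq_gapsFrom]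
        simp only [pvOuterB, if_neg hs]
        cases pvMergeB 0 (pvGapsB s.toList) m with
        | none => rfl
        | some m' => exact ih m'

-- ===== VERDICT (by name: the statement is the Claim_ definition above) =====
theorem getGapsLoc_spec : Claim_equal_getGapsLoc := by
  intro sa m idxC _ _
  show getGapsLoc sa m idxC = getGapsLoc_alt sa m idxC
  unfold getGapsLoc getGapsLoc_alt
  rw [pvOuter_eq]
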